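-- pv_equiv track=rewrite | github.com/kina-re/nexus-marketing-analyst | src/bayes_priors.py | canonical_channel_name
-- ===== SOURCE A (Python) =====
-- def canonical_channel_name(x: str) -> str:
--     """Make channel names consistent across GA (Markov/Shapley) and MMM columns."""
--     x = str(x).strip().lower()
--     x = x.replace("&", "and")
--     for ch in ["-", " ", "/", "\\", ".", ",", ":", ";", "|"]:
--         x = x.replace(ch, "_")
--     while "__" in x:
--         x = x.replace("__", "_")
--     return x.strip("_")
-- ===== SOURCE B (Python) =====
-- _SEPS = set("-_ /\\.,:;|")
--
-- def canonical_channel_name(x: str) -> str: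
--     """Single left-to-right pass: emit '_' for separator runs (collapsed via a
--     flag), expand '&' to 'and', copy everything else; then strip edge '_'."""
--     s = str(x).strip().lower()
--     out = []
--     last_us = False
--     for ch in s:
--         if ch in _SEPS:
--             if not last_us:
--                 out.append("_")
--                 last_us = True
--         elif ch == "&":
--             out.extend("and")
--             last_us = False
--         else:
--             out.append(ch)
--             last_us = False
--     return "".join(out).strip("_")
-- ===== Notes on version B (the rewrite author's own statement) =====
-- stated objective: alternative
-- what changed: Replaces A's ten whole-string .replace passes plus the repeated double-underscore-collapse loop with a single left-to-right scan that emits the output once, collapsing separator runs inline via a last-was-underscore flag.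
import Mathlib
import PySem

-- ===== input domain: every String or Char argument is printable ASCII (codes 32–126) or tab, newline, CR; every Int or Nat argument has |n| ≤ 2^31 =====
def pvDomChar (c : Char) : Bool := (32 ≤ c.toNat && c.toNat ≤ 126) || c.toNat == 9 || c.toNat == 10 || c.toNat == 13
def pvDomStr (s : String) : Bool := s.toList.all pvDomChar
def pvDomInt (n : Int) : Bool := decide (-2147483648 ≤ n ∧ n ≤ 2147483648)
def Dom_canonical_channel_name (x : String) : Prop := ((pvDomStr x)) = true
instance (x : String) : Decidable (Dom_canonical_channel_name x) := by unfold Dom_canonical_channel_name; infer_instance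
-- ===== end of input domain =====

/-
B replaces A's ten whole-string .replace passes and the repeated
double-underscore-collapse loop by a single left-to-right scan with a
last-was-underscore flag (objective: alternative, single pass).
-/

-- ===== PORT A =====
-- Helpers needed by the port's termination argument (the while loop shortens the string):
-- pairStep is exactly what one x.replace("__", "_") pass computes; hasPair is '"__" in x'.
def pairStep : List Char → List Char
  | [] => []
  | [c] => [c]
  | a :: b :: t => if a = '_' && b = '_' then '_' :: pairStep t else a :: pairStep (b :: t)

def hasPair : List Char → Bool
  | [] => false
  | [_] => false
  | a :: b :: t => (a = '_' && b = '_') || hasPair (b :: t)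

theorem go_pair : ∀ (fuel : Nat) (l acc : List Char), l.length ≤ fuel →
    PySem.Chars.replace.go ['_','_'] ['_'] fuel l acc = acc.reverse ++ pairStep l := by
  intro fuel
  induction fuel with
  | zero =>
    intro l acc h
    have : l = [] := List.eq_nil_of_length_eq_zero (Nat.le_zero.mp h)
    subst this; simp [PySem.Chars.replace.go, pairStep]
  | succ n ih =>
    intro l acc h
    match l with
    | [] => simp [PySem.Chars.replace.go, pairStep]
    | [c] =>
      rw [PySem.Chars.replace.go]
      have hpre : List.isPrefixOf ['_','_'] [c] = false := by simp [List.isPrefixOf]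
      rw [hpre]
      simp only [Bool.false_eq_true, if_false]
      rw [ih [] _ (by simp)]
      simp [pairStep]
    | a :: b :: t =>
      rw [PySem.Chars.replace.go]
      by_cases hab : a = '_' ∧ b = '_'
      · obtain ⟨ha, hb⟩ := hab
        subst ha; subst hb
        simp only [List.isPrefixOf, beq_self_eq_true, Bool.and_true, if_true]
        rw [show (List.drop ['_','_'].length ('_'::'_'::t)) = t from rfl]
        rw [ih t _ (by simp at h; omega)]
        simp [pairStep]
      · have hpre : List.isPrefixOf ['_','_'] (a :: b :: t) = false := by
          simp [List.isPrefixOf]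
          intro h1 h2; exact hab ⟨h1.symm, h2.symm⟩
        rw [hpre]
        simp only [Bool.false_eq_true, if_false]
        rw [ih (b :: t) _ (by simp at h ⊢; omega)]
        have hps : pairStep (a :: b :: t) = a :: pairStep (b :: t) := by
          rw [pairStep, if_neg]
          simp only [Bool.and_eq_true, decide_eq_true_eq]
          exact hab
        rw [hps]; simp

theorem replace_pair (l : List Char) :
    PySem.Chars.replace l ['_','_'] ['_'] = pairStep l := by
  rw [PySem.Chars.replace]
  simp [go_pair l.length l [] (le_refl _)]

theorem length_pairStep_le (l : List Char) : (pairStep l).length ≤ l.length := by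
  induction l using pairStep.induct with
  | case1 => simp [pairStep]
  | case2 c => simp [pairStep]
  | case3 a b t hab ih => simp [pairStep, hab]; omega
  | case4 a b t hab ih =>
    rw [pairStep, if_neg (by simp_all)]
    simp at ih ⊢; omega

theorem length_pairStep_lt (l : List Char) (h : hasPair l = true) :
    (pairStep l).length < l.length := by
  induction l using pairStep.induct with
  | case1 => simp [hasPair] at h
  | case2 c => simp [hasPair] at h
  | case3 a b t hab ih =>
    simp [pairStep, hab]
    have := length_pairStep_le t; omega
  | case4 a b t hab ih =>
    rw [hasPair] at h
    simp only [hab, Bool.false_or] at h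
    simp [pairStep, hab]
    have := ih h; simpa using this

theorem hasPair_iff (l : List Char) : hasPair l = true ↔ ['_','_'] <:+: l := by
  induction l using hasPair.induct with
  | case1 => simp [hasPair]
  | case2 c =>
    simp [hasPair]
    intro h
    have := h.length_le; simp at this
  | case3 a b t ih =>
    rw [hasPair]
    constructor
    · intro h
      rcases Bool.or_eq_true_iff.mp h with h | h
      · simp only [Bool.and_eq_true, decide_eq_true_eq] at h
        obtain ⟨rfl, rfl⟩ := h
        exact ⟨[], t, rfl⟩
      · exact List.infix_cons (ih.mp h)
    · intro h
      rcases List.infix_cons_iff.mp h with h | h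
      · rcases h with ⟨r, hr⟩
        cases hr
        simp
      · simp [ih.mpr h]

-- the 'while "__" in x: x = x.replace("__", "_")' loop of A
def pvWhileUnderscore (s : String) : String :=
  if PySem.Str.isIn "__" s then pvWhileUnderscore (PySem.Str.replace s "__" "_") else s
termination_by s.toList.length
decreasing_by
  rename_i h
  rw [PySem.Str.toList_replace]
  rw [show ("__" : String).toList = ['_','_'] from rfl, show ("_" : String).toList = ['_'] from rfl]
  rw [replace_pair]
  apply length_pairStep_lt
  rw [hasPair_iff]
  rw [PySem.Str.isIn_eq] at h
  exact (PySem.Chars.isIn_iff_infix _ _).mp h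

def canonical_channel_name (x : String) : String :=
  let x1 := PySem.Str.lower (PySem.Str.strip x)   -- str(x).strip().lower(); str() is the identity on str
  let x2 := PySem.Str.replace x1 "&" "and"
  let x3 := (["-", " ", "/", "\\", ".", ",", ":", ";", "|"] : List String).foldl
      (fun s ch => PySem.Str.replace s ch "_") x2
  PySem.Str.stripChars (pvWhileUnderscore x3) "_"

-- ===== PORT B =====
def pvSeps : PySem.Set Char := PySem.Set.ofList "-_ /\\.,:;|".toList

def canonical_channel_name_alt (x : String) : String :=
  let s := PySem.Str.lower (PySem.Str.strip x)
  let st := s.toList.foldl (fun (st : List Char × Bool) ch =>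
      if ch ∈ pvSeps then (if st.2 then st else (st.1 ++ ['_'], true))
      else if ch = '&' then (st.1 ++ ['a','n','d'], false)
      else (st.1 ++ [ch], false)) ([], false)
  PySem.Str.stripChars (String.ofList st.1) "_"

-- ===== PRECONDITION & SPEC =====
def Spec_canonical_channel_name (x : String) (out : String) : Prop := out = canonical_channel_name_alt x
instance (x : String) (out : String) : Decidable (Spec_canonical_channel_name x out) := by unfold Spec_canonical_channel_name; infer_instance

-- ===== CLAIM (what is proved, stated in full; the proofs are below) =====
def Claim_equal_canonical_channel_name : Prop := ∀ (x : String), Dom_canonical_channel_name x → Spec_canonical_channel_name x (canonical_channel_name x)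

-- ===== LEMMAS AND PROOFS =====

theorem replace_single (c : Char) (t : List Char) (l : List Char) :
    PySem.Chars.replace l [c] t = l.flatMap (fun a => if a = c then t else [a]) := by
  have go1 : ∀ (fuel : Nat) (l acc : List Char), l.length ≤ fuel →
      PySem.Chars.replace.go [c] t fuel l acc
        = acc.reverse ++ l.flatMap (fun a => if a = c then t else [a]) := by
    intro fuel
    induction fuel with
    | zero =>
      intro l acc h
      have : l = [] := List.eq_nil_of_length_eq_zero (Nat.le_zero.mp h)
      subst this; simp [PySem.Chars.replace.go]
    | succ n ih =>
      intro l acc h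
      match l with
      | [] => simp [PySem.Chars.replace.go]
      | a :: t' =>
        rw [PySem.Chars.replace.go]
        by_cases ha : a = c
        · subst ha
          have hpre : List.isPrefixOf [a] (a :: t') = true := by simp [List.isPrefixOf]
          rw [hpre]
          simp only [if_true]
          rw [show (List.drop [a].length (a :: t')) = t' from rfl]
          rw [ih t' _ (by simp at h; omega)]
          simp
        · have hpre : List.isPrefixOf [c] (a :: t') = false := by
            simp [List.isPrefixOf]; exact fun h' => ha h'.symm
          rw [hpre]
          simp only [Bool.false_eq_true, if_false]
          rw [ih t' _ (by simp at h; omega)]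
          simp [ha]
  rw [PySem.Chars.replace]
  simp [go1 l.length l [] (le_refl _)]

-- run-of-underscores collapser: collapseF false is what the while loop of A leaves behind
def collapseF : Bool → List Char → List Char
  | _, [] => []
  | flag, c :: t =>
    if c = '_' then (if flag then collapseF true t else '_' :: collapseF true t)
    else c :: collapseF false t

-- the per-character effect of A's replace pipeline
def gExp (c : Char) : List Char :=
  if c = '&' then ['a','n','d'] else if c ∈ pvSeps then ['_'] else [c]

theorem pvSeps_eq : pvSeps = ['-','_',' ','/','\\','.',',',':',';','|'] := by decide

theorem collapseF_cons_ne {c : Char} (hc : c ≠ '_') (flag : Bool) (t : List Char) :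
    collapseF flag (c :: t) = c :: collapseF false t := by
  rw [collapseF]; simp [hc]

theorem collapseF_us_true (t : List Char) : collapseF true ('_' :: t) = collapseF true t := by
  rw [collapseF]; simp

theorem collapseF_us_false (t : List Char) : collapseF false ('_' :: t) = '_' :: collapseF true t := by
  rw [collapseF]; simp

theorem collapseF_pairStep (l : List Char) : ∀ flag, collapseF flag (pairStep l) = collapseF flag l := by
  induction l using pairStep.induct with
  | case1 => intro flag; rfl
  | case2 c => intro flag; rfl
  | case3 a b t hab ih =>
    intro flag
    simp only [Bool.and_eq_true, decide_eq_true_eq] at hab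
    obtain ⟨rfl, rfl⟩ := hab
    rw [pairStep]
    simp only [decide_true, Bool.and_self, if_true]
    rw [collapseF, collapseF]
    simp only []
    rw [ih true]
    cases flag
    · simp [collapseF]
    · simp [collapseF]
  | case4 a b t hab ih =>
    intro flag
    rw [pairStep, if_neg (by simp_all)]
    rw [collapseF, collapseF]
    by_cases ha : a = '_' <;> simp [ha, ih]

theorem collapseF_id (l : List Char) (h : hasPair l = false) :
    ∀ flag, (flag = true → l.head? ≠ some '_') → collapseF flag l = l := by
  induction l using hasPair.induct with
  | case1 => intro flag _; rfl
  | case2 c =>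
    intro flag hf
    rw [collapseF]
    by_cases hc : c = '_'
    · subst hc
      cases flag
      · simp [collapseF]
      · have := hf rfl; simp at this
    · simp [hc, collapseF]
  | case3 a b t ih =>
    intro flag hf
    rw [hasPair] at h
    rcases Bool.or_eq_false_iff.mp h with ⟨h1, h2⟩
    rw [collapseF]
    by_cases ha : a = '_'
    · subst ha
      have hb : b ≠ '_' := by
        intro hb; subst hb; simp at h1
      cases flag
      · have h3 := ih h2 true (by simp [hb])
        simp [h3]
      · have := hf rfl; simp at this
    · simp only [ha, if_false]
      rw [ih h2 false (by simp)]

-- A's while loop computes collapseF false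
theorem pvWhile_toList : ∀ (n : Nat) (s : String), s.toList.length ≤ n →
    (pvWhileUnderscore s).toList = collapseF false s.toList := by
  intro n
  induction n with
  | zero =>
    intro s h
    have hnil : s.toList = [] := List.eq_nil_of_length_eq_zero (Nat.le_zero.mp h)
    rw [pvWhileUnderscore]
    have hin : PySem.Str.isIn "__" s = false := by
      rw [PySem.Str.isIn_eq, hnil]; decide
    rw [hin]
    simp [hnil, collapseF]
  | succ n ih =>
    intro s h
    rw [pvWhileUnderscore]
    by_cases hin : PySem.Str.isIn "__" s = true
    · rw [hin]
      simp only [if_true]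
      have hlt : (PySem.Str.replace s "__" "_").toList.length < s.toList.length := by
        rw [PySem.Str.toList_replace,
          show ("__" : String).toList = ['_','_'] from rfl,
          show ("_" : String).toList = ['_'] from rfl, replace_pair]
        apply length_pairStep_lt
        rw [hasPair_iff]
        rw [PySem.Str.isIn_eq] at hin
        exact (PySem.Chars.isIn_iff_infix _ _).mp hin
      rw [ih _ (by omega)]
      rw [PySem.Str.toList_replace,
        show ("__" : String).toList = ['_','_'] from rfl,
        show ("_" : String).toList = ['_'] from rfl, replace_pair]
      exact collapseF_pairStep _ _
    · rw [Bool.not_eq_true] at hin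
      rw [hin]
      simp only [Bool.false_eq_true, if_false]
      have hnp : hasPair s.toList = false := by
        rw [← Bool.not_eq_true, hasPair_iff]
        rw [PySem.Str.isIn_eq] at hin
        exact (PySem.Chars.isIn_eq_false_iff _ _).mp hin
      exact (collapseF_id _ hnp false (by simp)).symm

-- A's replace pipeline is a per-character expansion
def sepRepl (c : Char) (l : List Char) : List Char := PySem.Chars.replace l [c] ['_']

theorem sepRepl_eq (c : Char) (l : List Char) : PySem.Chars.replace l [c] ['_'] = sepRepl c l := rfl

theorem gExp_sep {c : Char} (hc : c ∈ pvSeps) : gExp c = ['_'] := by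
  rw [pvSeps_eq] at hc
  simp only [List.mem_cons, List.not_mem_nil, or_false] at hc
  rcases hc with rfl|rfl|rfl|rfl|rfl|rfl|rfl|rfl|rfl|rfl <;> decide

theorem pipeline (l : List Char) :
    sepRepl '|' (sepRepl ';' (sepRepl ':' (sepRepl ',' (sepRepl '.' (sepRepl '\\' (sepRepl '/'
      (sepRepl ' ' (sepRepl '-' (PySem.Chars.replace l ['&'] ['a','n','d'])))))))))
      = l.flatMap gExp := by
  simp only [sepRepl, replace_single, List.flatMap_assoc]
  apply List.flatMap_congr
  intro c _
  by_cases hamp : c = '&'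
  · subst hamp; decide
  · by_cases hm : c ∈ pvSeps
    · have hg := gExp_sep hm
      rw [pvSeps_eq] at hm
      simp only [List.mem_cons, List.not_mem_nil, or_false] at hm
      rcases hm with rfl|rfl|rfl|rfl|rfl|rfl|rfl|rfl|rfl|rfl <;> decide
    · have hg : gExp c = [c] := by rw [gExp, if_neg hamp, if_neg hm]
      rw [hg]
      rw [pvSeps_eq] at hm
      simp only [List.mem_cons, List.not_mem_nil, or_false, not_or] at hm
      obtain ⟨h1, h2, h3, h4, h5, h6, h7, h8, h9, h10⟩ := hm
      simp [hamp, h1, h3, h4, h5, h6, h7, h8, h9, h10]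

theorem stripChars_congr {s t c : String} (h : s.toList = t.toList) :
    PySem.Str.stripChars s c = PySem.Str.stripChars t c := by
  rw [PySem.Str.stripChars, PySem.Str.stripChars, h]

-- B's fold computes collapseF applied to the same expansion
theorem fold_inv (l : List Char) : ∀ (out : List Char) (flag : Bool),
    (l.foldl (fun (st : List Char × Bool) ch =>
      if ch ∈ pvSeps then (if st.2 then st else (st.1 ++ ['_'], true))
      else if ch = '&' then (st.1 ++ ['a','n','d'], false)
      else (st.1 ++ [ch], false)) (out, flag)).1
    = out ++ collapseF flag (l.flatMap gExp) := by
  induction l with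
  | nil => intro out flag; simp [collapseF]
  | cons c t ih =>
    intro out flag
    rw [List.flatMap_cons, List.foldl_cons]
    by_cases hc : c ∈ pvSeps
    · rw [gExp_sep hc]
      rw [show (['_'] ++ t.flatMap gExp) = '_' :: t.flatMap gExp from rfl]
      cases flag
      · simp only [if_pos hc, Bool.false_eq_true, if_false]
        rw [ih, collapseF_us_false]
        simp
      · simp only [if_pos hc, if_true]
        rw [ih, collapseF_us_true]
    · have hc' : c ≠ '_' := by
        intro he; subst he; exact hc (by rw [pvSeps_eq]; decide)
      by_cases hamp : c = '&'
      · subst hamp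
        rw [show gExp '&' = ['a','n','d'] from by decide]
        simp only [if_neg hc]
        rw [ih]
        rw [show (['a','n','d'] ++ t.flatMap gExp) = 'a'::'n'::'d':: t.flatMap gExp from rfl]
        rw [collapseF_cons_ne (by decide), collapseF_cons_ne (by decide),
          collapseF_cons_ne (by decide)]
        simp
      · rw [show gExp c = [c] from by rw [gExp, if_neg hamp, if_neg hc]]
        simp only [if_neg hc, if_neg hamp]
        rw [ih]
        rw [show ([c] ++ t.flatMap gExp) = c :: t.flatMap gExp from rfl]
        rw [collapseF_cons_ne hc']
        simp

-- ===== VERDICT (by name: the statement is the Claim_ definition above) =====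
theorem canonical_channel_name_spec : Claim_equal_canonical_channel_name := by
  intro x _
  unfold Spec_canonical_channel_name
  rw [canonical_channel_name, canonical_channel_name_alt]
  simp only [List.foldl_cons, List.foldl_nil]
  apply stripChars_congr
  rw [String.toList_ofList]
  rw [pvWhile_toList _ _ (le_refl _)]
  rw [fold_inv]
  simp only [PySem.Str.toList_replace]
  rw [show ("&" : String).toList = ['&'] from rfl,
    show ("and" : String).toList = ['a','n','d'] from rfl,
    show ("-" : String).toList = ['-'] from rfl,
    show (" " : String).toList = [' '] from rfl,
    show ("/" : String).toList = ['/'] from rfl,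
    show ("\\" : String).toList = ['\\'] from rfl,
    show ("." : String).toList = ['.'] from rfl,
    show ("," : String).toList = [','] from rfl,
    show (":" : String).toList = [':'] from rfl,
    show (";" : String).toList = [';'] from rfl,
    show ("|" : String).toList = ['|'] from rfl,
    show ("_" : String).toList = ['_'] from rfl]
  rw [sepRepl_eq, sepRepl_eq, sepRepl_eq, sepRepl_eq, sepRepl_eq, sepRepl_eq,
    sepRepl_eq, sepRepl_eq, sepRepl_eq]
  rw [pipeline]
  simp
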